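-- pv_equiv track=rewrite | github.com/juliet2112/DSA | egzaminy/termin1-2425/Egz1B/egz1B.py | critical
-- ===== SOURCE A (Python) =====
-- def dfs(G):
--     def dfsvisit(v):
--         visited[v] = True
--         for u in G[v]:
--             if visited[u] == False:
--                 dfsvisit(u)
--         sortedd.append(v)
--
--
--     n = len(G)
--     sortedd = []
--     visited = [False for _ in range (n)]
--     for v in range (n):
--         if not visited[v]:
--             dfsvisit(v)
--
--     return sortedd
--
-- def create_graph(E,v):
--     NG = [[] for _ in range (v)]
--     for v,u in E:
--         NG[v].append(u)
--
--     return NG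
--
-- def reverse(T):
--     New_T = []
--     while T:
--         x = T.pop()
--         New_T.append(x)
--
--     return New_T
--
-- def critical(V, E):
--     G = create_graph(E, V)
--     topo = dfs(G)
--     topo = reverse(topo)
--     n = len(G)
--
--     dp = [[0 for _ in range(n)] for _ in range (n)]
--     for i in range (n):
--         dp[i][i] = 1
--
--     for a in range (n):
--         for v in topo:
--             for u in G[v]:
--                 dp[a][u] += dp[a][v]
--
--     ile = 0
--     for i,j in E:
--         if dp[i][j] == 1:
--             ile +=1
--
--     return ile
-- ===== SOURCE B (Python) =====
-- def critical(V, E):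
--     succ = [[] for _ in range(V)]
--     for a, b in E:
--         succ[a].append(b)
--
--     # finish-order DFS with an explicit stack, then reversed -> topological order
--     order = []
--     seen = [False] * V
--     for s in range(V):
--         stack = [(s, False)]
--         while stack:
--             v, done = stack.pop()
--             if done:
--                 order.append(v)
--             elif not seen[v]:
--                 seen[v] = True
--                 stack.append((v, True))
--                 for u in reversed(succ[v]):
--                     stack.append((u, False))
--     order.reverse()
--
--     # lazy per-source path-count rows, memoized by source vertex
--     rows = {}
--
--     def row(a):
--         dp = [0] * V
--         dp[a] = 1
--         for v in order:
--             for u in succ[v]: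
--                 dp[u] += dp[v]
--         return dp
--
--     total = 0
--     for i, j in E:
--         if i not in rows:
--             rows[i] = row(i)
--         if rows[i][j] == 1:
--             total += 1
--     return total
-- ===== Notes on version B (the rewrite author's own statement) =====
-- stated objective: faster
-- what changed: Replaces the recursive-DFS topological sort and the eagerly built V x V all-pairs dp matrix (one pass per source vertex) by an explicit-stack iterative DFS and lazily computed single-source dp rows memoized in a dict keyed by edge source, so only distinct edge sources are processed and no V x V table is allocated.
import Mathlib
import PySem

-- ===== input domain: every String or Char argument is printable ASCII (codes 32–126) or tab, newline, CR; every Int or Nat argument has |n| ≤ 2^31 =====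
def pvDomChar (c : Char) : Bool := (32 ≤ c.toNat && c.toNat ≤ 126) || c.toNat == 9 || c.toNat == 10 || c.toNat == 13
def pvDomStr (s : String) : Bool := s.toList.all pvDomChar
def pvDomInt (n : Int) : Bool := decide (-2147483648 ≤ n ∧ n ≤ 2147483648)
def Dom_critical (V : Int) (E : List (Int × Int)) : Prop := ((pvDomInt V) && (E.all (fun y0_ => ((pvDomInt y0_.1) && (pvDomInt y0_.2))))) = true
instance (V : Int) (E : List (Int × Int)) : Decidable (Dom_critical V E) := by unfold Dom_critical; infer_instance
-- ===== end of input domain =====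

-- B replaces A's recursive-DFS topological sort and eager V×V all-pairs dp table by an
-- explicit-stack iterative DFS and lazily computed, dict-memoized single-source dp rows
-- (objective: faster; no V x V table, and only distinct edge sources are processed).

-- ===== PORT A =====

-- create_graph(E, v)
def pvCreateGraph (E : List (Int × Int)) (v : Int) : List (List Int) :=
  let NG : List (List Int) := (PySem.List.pyRange 0 v 1).map (fun _ => [])
  E.foldl (fun NG p =>
    PySem.List.pySetD NG p.1 (PySem.List.pyGetD NG p.1 [] ++ [p.2])) NG

-- dfsvisit(v), state = (visited, sortedd); fuel only makes the recursion total: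
-- every actual call below uses fuel > number of still-unvisited vertices, so fuel 0 is never hit.
-- 'if visited[u] == False' raises IndexError for u out of range in Python (pyGet? = none: skip; outside Pre_).
def pvDfsVisit (G : List (List Int)) : Nat → Int → List Bool × List Int → List Bool × List Int
  | 0, _, st => st
  | f+1, v, st =>
    let st1 := (PySem.List.pySetD st.1 v true, st.2)
    let st2 := (PySem.List.pyGetD G v []).foldl
      (fun st u => if PySem.List.pyGet? st.1 u = some false then pvDfsVisit G f u st else st) st1
    (st2.1, st2.2 ++ [v])

-- dfs(G)
def pvDfs (G : List (List Int)) : List Int :=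
  let n := G.length
  ((List.range n).foldl (fun st (v : Nat) =>
      if PySem.List.pyGet? st.1 (v : Int) = some false then pvDfsVisit G (n+1) (v : Int) st else st)
    ((List.range n).map (fun _ => false), ([] : List Int))).2

-- reverse(T): while T: x = T.pop(); New_T.append(x)
def pvReverseGo (T newT : List Int) : List Int :=
  match h : PySem.List.pop? T (-1) with
  | none => newT
  | some (x, T') => pvReverseGo T' (newT ++ [x])
termination_by T.length
decreasing_by
  have := PySem.List.length_of_pop?_eq_some T h
  simp at this
  omega

def pvReverse (T : List Int) : List Int := pvReverseGo T []

def critical (V : Int) (E : List (Int × Int)) : Int :=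
  let G := pvCreateGraph E V
  let topo := pvDfs G
  let topo := pvReverse topo
  let n := G.length
  let dp : List (List Int) := (List.range n).map (fun _ => (List.range n).map (fun _ => (0 : Int)))
  let dp := (List.range n).foldl (fun dp (i : Nat) =>
      PySem.List.pySetD dp (i : Int)
        (PySem.List.pySetD (PySem.List.pyGetD dp (i : Int) []) (i : Int) 1)) dp
  let dp := (List.range n).foldl (fun dp (a : Nat) =>
      topo.foldl (fun dp v =>
        (PySem.List.pyGetD G v []).foldl (fun dp u =>
          PySem.List.pySetD dp (a : Int)
            (PySem.List.pySetD (PySem.List.pyGetD dp (a : Int) []) u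
              (PySem.List.pyGetD (PySem.List.pyGetD dp (a : Int) []) u 0 +
               PySem.List.pyGetD (PySem.List.pyGetD dp (a : Int) []) v 0))) dp) dp) dp
  E.foldl (fun ile p =>
    if PySem.List.pyGetD (PySem.List.pyGetD dp p.1 []) p.2 0 = 1 then ile + 1 else ile) 0

-- ===== PORT B =====

-- succ = [[] for _ in range(V)]; for a, b in E: succ[a].append(b)
def pvBuildSucc (E : List (Int × Int)) (V : Int) : List (List Int) :=
  let succ : List (List Int) := (PySem.List.pyRange 0 V 1).map (fun _ => [])
  E.foldl (fun s p =>
    PySem.List.pySetD s p.1 (PySem.List.pyGetD s p.1 [] ++ [p.2])) succ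

-- termination helper for the stack machine (used in its decreasing_by)
theorem pvCountFalseSetLt (xs : List Bool) (k : Nat) (h : xs[k]? = some false) :
    (xs.set k true).count false < xs.count false := by
  induction xs generalizing k with
  | nil => simp at h
  | cons x t ih =>
    cases k with
    | zero =>
      simp_all
    | succ k =>
      simp only [List.getElem?_cons_succ] at h
      have := ih k h
      simp [List.count_cons]
      omega

theorem pvCountFalsePySetDLt (seen : List Bool) (v : Int)
    (h : PySem.List.pyGet? seen v = some false) :
    (PySem.List.pySetD seen v true).count false < seen.count false := by
  unfold PySem.List.pyGet? at h
  unfold PySem.List.pySetD PySem.List.pySet?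
  cases hk : PySem.List.pyIdx? seen.length v with
  | none => rw [hk] at h; simp at h
  | some k =>
    rw [hk] at h
    simp only [Option.bind_some] at h
    simp only [Option.map_some, Option.getD_some]
    exact pvCountFalseSetLt seen k h

-- the 'while stack:' loop; stack frame (v, done): done=True appends v to the finish order
def pvStack (G : List (List Int)) : List (Int × Bool) → List Bool → List Int → List Bool × List Int
  | [], seen, order => (seen, order)
  | (v, done) :: stack, seen, order =>
    if done then pvStack G stack seen (order ++ [v])
    else if h : PySem.List.pyGet? seen v = some false then
      pvStack G
        ((PySem.List.pyGetD G v []).reverse.foldl (fun s u => (u, false) :: s) ((v, true) :: stack))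
        (PySem.List.pySetD seen v true) order
    else
      -- seen[v] already True, or v out of range (Python IndexError, outside Pre_): frame dropped
      pvStack G stack seen order
termination_by stack seen _ => (seen.count false, stack.length)
decreasing_by
  · exact Prod.Lex.right _ (by simp)
  · exact Prod.Lex.left _ _ (pvCountFalsePySetDLt seen v h)
  · exact Prod.Lex.right _ (by simp)

def critical_alt (V : Int) (E : List (Int × Int)) : Int :=
  let succ := pvBuildSucc E V
  let st := (PySem.List.pyRange 0 V 1).foldl
      (fun st s => pvStack succ [(s, false)] st.1 st.2)
      (PySem.List.pyRepeat [false] V, ([] : List Int))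
  let order := st.2.reverse
  let row := fun (a : Int) =>
    let dp := PySem.List.pySetD (PySem.List.pyRepeat [(0 : Int)] V) a 1
    order.foldl (fun dp v =>
      (PySem.List.pyGetD succ v []).foldl (fun dp u =>
        PySem.List.pySetD dp u (PySem.List.pyGetD dp u 0 + PySem.List.pyGetD dp v 0)) dp) dp
  (E.foldl (fun (st : Int × PySem.Dict Int (List Int)) p =>
      let rows := if st.2.contains p.1 then st.2 else st.2.insert p.1 (row p.1)
      (if PySem.List.pyGetD (rows.getD p.1 []) p.2 0 = 1 then st.1 + 1 else st.1, rows))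
    ((0 : Int), PySem.Dict.empty)).1

-- ===== PRECONDITION & SPEC =====
-- Pre_ excludes inputs on which Python A raises: an edge endpoint outside [-V, V) is an
-- IndexError (at graph build, in dfsvisit, or at the dp lookups). Nothing else is excluded.
def Pre_critical (V : Int) (E : List (Int × Int)) : Prop :=
  ∀ p ∈ E, (-V ≤ p.1 ∧ p.1 < V) ∧ (-V ≤ p.2 ∧ p.2 < V)
instance (V : Int) (E : List (Int × Int)) : Decidable (Pre_critical V E) := by
  unfold Pre_critical; infer_instance

def pvWitness_critical : Int × (List (Int × Int)) := (3, [(0, 1), (0, 2), (1, 2)])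

def Spec_critical (V : Int) (E : List (Int × Int)) (out : Int) : Prop := out = critical_alt V E
instance (V : Int) (E : List (Int × Int)) (out : Int) : Decidable (Spec_critical V E out) := by
  unfold Spec_critical; infer_instance

-- ===== CLAIM (what is proved, stated in full; the proofs are below) =====
def Claim_equal_critical : Prop :=
  ∀ (V : Int) (E : List (Int × Int)), Dom_critical V E → Pre_critical V E → Spec_critical V E (critical V E)

-- ===== LEMMAS AND PROOFS =====

-- ---- wrapped-index bookkeeping ----

def pvIdx (n : Nat) (i : Int) : Nat := if 0 ≤ i then i.toNat else n - (-i).toNat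

theorem pvIdx_lt {n : Nat} {i : Int} (h : PySem.Raise.InRange n i) : pvIdx n i < n := by
  rcases h with ⟨h1, h2⟩
  unfold pvIdx
  split <;> omega

theorem pvIdx?_eq {n : Nat} {i : Int} (h : PySem.Raise.InRange n i) :
    PySem.List.pyIdx? n i = some (pvIdx n i) := by
  rcases h with ⟨h1, h2⟩
  unfold PySem.List.pyIdx? pvIdx
  split_ifs <;> first | rfl | omega

theorem pvGetD_eq {α : Type} (xs : List α) (i : Int) (d : α)
    (h : PySem.Raise.InRange xs.length i) :
    PySem.List.pyGetD xs i d = xs.getD (pvIdx xs.length i) d := by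
  unfold PySem.List.pyGetD PySem.List.pyGet?
  rw [pvIdx?_eq h]
  simp [List.getD_eq_getElem?_getD]

theorem pvSetD_eq {α : Type} (xs : List α) (i : Int) (v : α)
    (h : PySem.Raise.InRange xs.length i) :
    PySem.List.pySetD xs i v = xs.set (pvIdx xs.length i) v := by
  unfold PySem.List.pySetD PySem.List.pySet?
  rw [pvIdx?_eq h]
  rfl

-- ---- generic fold facts ----

theorem pvFoldLen {α β : Type} (l : List β) (f : List α → β → List α)
    (hf : ∀ acc b, (f acc b).length = acc.length) :
    ∀ acc, (l.foldl f acc).length = acc.length := by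
  induction l with
  | nil => intro acc; rfl
  | cons x t ih => intro acc; rw [List.foldl_cons, ih, hf]

theorem pvFoldlCongrInv {α β : Type} (P : α → Prop) (l : List β) (f g : α → β → α)
    (hP : ∀ acc b, P acc → P (f acc b))
    (heq : ∀ acc b, P acc → b ∈ l → f acc b = g acc b) :
    ∀ acc, P acc → l.foldl f acc = l.foldl g acc := by
  induction l with
  | nil => intro acc _; rfl
  | cons x t ih =>
    intro acc hacc
    rw [List.foldl_cons, List.foldl_cons, ← heq acc x hacc (by simp)]
    exact ih (fun acc b h hb => heq acc b h (by simp [hb])) (f acc x) (hP acc x hacc)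

-- ---- the stack machine simulates the recursive DFS ----

theorem pvCountFalseSetTrueLe (xs : List Bool) (k : Nat) :
    (xs.set k true).count false ≤ xs.count false := by
  induction xs generalizing k with
  | nil => simp
  | cons x t ih =>
    cases k with
    | zero => cases x <;> simp
    | succ k => simp only [List.set_cons_succ, List.count_cons]; have := ih k; omega

theorem pvCountFalsePySetDLe (xs : List Bool) (i : Int) :
    (PySem.List.pySetD xs i true).count false ≤ xs.count false := by
  unfold PySem.List.pySetD PySem.List.pySet?
  cases hk : PySem.List.pyIdx? xs.length i with
  | none => simp
  | some k => simpa using pvCountFalseSetTrueLe xs k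

theorem pvVisitLe (G : List (List Int)) :
    ∀ (f : Nat) (v : Int) (st : List Bool × List Int),
      (pvDfsVisit G f v st).1.count false ≤ st.1.count false ∧
      (pvDfsVisit G f v st).1.length = st.1.length := by
  intro f
  induction f with
  | zero => intro v st; exact ⟨le_refl _, rfl⟩
  | succ f ih =>
    intro v st
    have loopLe : ∀ (us : List Int) (st : List Bool × List Int),
        ((us.foldl (fun st u => if PySem.List.pyGet? st.1 u = some false
            then pvDfsVisit G f u st else st) st).1.count false ≤ st.1.count false) ∧
        ((us.foldl (fun st u => if PySem.List.pyGet? st.1 u = some false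
            then pvDfsVisit G f u st else st) st).1.length = st.1.length) := by
      intro us
      induction us with
      | nil => intro st; exact ⟨le_refl _, rfl⟩
      | cons u ut ihu =>
        intro st
        rw [List.foldl_cons]
        by_cases hc : PySem.List.pyGet? st.1 u = some false
        · rw [if_pos hc]
          have h1 := ih u st
          have h2 := ihu (pvDfsVisit G f u st)
          exact ⟨le_trans h2.1 h1.1, h2.2.trans h1.2⟩
        · rw [if_neg hc]; exact ihu st
    show ((_ : List Bool × List Int).1.count false ≤ _) ∧ _
    simp only [pvDfsVisit]
    have h1 := loopLe (PySem.List.pyGetD G v []) (PySem.List.pySetD st.1 v true, st.2)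
    refine ⟨le_trans h1.1 (pvCountFalsePySetDLe st.1 v), ?_⟩
    rw [h1.2]
    exact PySem.List.length_pySetD st.1 v true

theorem pvPushRev (l : List Int) (st : List (Int × Bool)) :
    l.reverse.foldl (fun s u => (u, false) :: s) st = l.map (fun u => (u, false)) ++ st := by
  induction l generalizing st with
  | nil => rfl
  | cons x t ih =>
    rw [List.reverse_cons, List.foldl_append]
    simp only [List.foldl_cons, List.foldl_nil, List.map_cons, List.cons_append]
    rw [ih st]

theorem pvCountPosOfGetFalse {vis : List Bool} {v : Int}
    (h : PySem.List.pyGet? vis v = some false) : 0 < vis.count false := by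
  have : false ∈ vis := PySem.List.mem_of_pyGet?_eq_some vis h
  exact List.count_pos_iff.mpr this

theorem pvSimVisit (G : List (List Int)) :
    ∀ (f : Nat) (vis : List Bool) (out : List Int) (v : Int) (rest : List (Int × Bool)),
      PySem.List.pyGet? vis v = some false → vis.count false ≤ f →
      pvStack G ((v, false) :: rest) vis out
        = pvStack G rest (pvDfsVisit G f v (vis, out)).1 (pvDfsVisit G f v (vis, out)).2 := by
  intro f
  induction f with
  | zero =>
    intro vis out v rest hv hf
    exact absurd hf (by have := pvCountPosOfGetFalse hv; omega)
  | succ f ih =>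
    have simLoop : ∀ (us : List Int) (vis : List Bool) (out : List Int) (v : Int)
        (rest : List (Int × Bool)), vis.count false ≤ f →
        pvStack G (us.map (fun u => (u, false)) ++ (v, true) :: rest) vis out
          = pvStack G rest
              (us.foldl (fun st u => if PySem.List.pyGet? st.1 u = some false
                 then pvDfsVisit G f u st else st) (vis, out)).1
              ((us.foldl (fun st u => if PySem.List.pyGet? st.1 u = some false
                 then pvDfsVisit G f u st else st) (vis, out)).2 ++ [v]) := by
      intro us
      induction us with
      | nil =>
        intro vis out v rest _
        simp only [List.map_nil, List.nil_append, List.foldl_nil]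
        rw [pvStack]
        simp
      | cons u ut ihu =>
        intro vis out v rest hf
        simp only [List.map_cons, List.cons_append, List.foldl_cons]
        by_cases hc : PySem.List.pyGet? vis u = some false
        · rw [ih vis out u (ut.map (fun u => (u, false)) ++ (v, true) :: rest) hc hf,
              if_pos hc]
          exact ihu (pvDfsVisit G f u (vis, out)).1 (pvDfsVisit G f u (vis, out)).2 v rest
            (le_trans (pvVisitLe G f u (vis, out)).1 hf)
        · rw [if_neg hc, pvStack]
          simp only [Bool.false_eq_true, if_false]
          rw [dif_neg hc]
          exact ihu vis out v rest hf
    intro vis out v rest hv hf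
    rw [pvStack]
    simp only [Bool.false_eq_true, if_false]
    rw [dif_pos hv, pvPushRev]
    have hf' : (PySem.List.pySetD vis v true).count false ≤ f := by
      have := pvCountFalsePySetDLt vis v hv; omega
    rw [simLoop (PySem.List.pyGetD G v []) (PySem.List.pySetD vis v true) out v rest hf']
    simp only [pvDfsVisit]

-- ---- reverse helper ----

theorem pvRevGo : ∀ (T acc : List Int), pvReverseGo T acc = acc ++ T.reverse := by
  intro T
  induction T using List.reverseRecOn with
  | nil =>
    intro acc
    rw [pvReverseGo]
    split
    · simp
    · rename_i h
      simp [PySem.List.pop?, PySem.List.pyIdx?] at h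
  | append_singleton xs x ih =>
    intro acc
    rw [pvReverseGo]
    split
    · rename_i h
      rw [PySem.List.pop?_last] at h
      exact absurd h (by simp)
    · rename_i y T' h
      rw [PySem.List.pop?_last] at h
      obtain ⟨rfl, rfl⟩ : x = y ∧ xs = T' := by
        have := Option.some_inj.mp h
        exact ⟨congrArg Prod.fst this, congrArg Prod.snd this⟩
      rw [ih]
      simp

theorem pvReverseEq (T : List Int) : pvReverse T = T.reverse := by
  unfold pvReverse
  rw [pvRevGo]
  simp

-- ---- outer DFS loop: machine = recursion ----

theorem pvStackSingle (G : List (List Int)) (F : Nat) (st : List Bool × List Int) (v : Int)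
    (hf : st.1.count false ≤ F) :
    pvStack G [(v, false)] st.1 st.2
      = if PySem.List.pyGet? st.1 (v : Int) = some false then pvDfsVisit G F v st else st := by
  by_cases hc : PySem.List.pyGet? st.1 v = some false
  · rw [pvSimVisit G F st.1 st.2 v [] hc hf, if_pos hc, pvStack]
  · rw [if_neg hc, pvStack]
    simp only [Bool.false_eq_true, if_false]
    rw [dif_neg hc, pvStack]

theorem pvOuterEq (G : List (List Int)) (F : Nat) :
    ∀ (ks : List Nat) (st : List Bool × List Int), st.1.count false ≤ F →
      ks.foldl (fun st (s : Nat) => pvStack G [((s : Int), false)] st.1 st.2) st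
        = ks.foldl (fun st (v : Nat) => if PySem.List.pyGet? st.1 (v : Int) = some false
            then pvDfsVisit G F (v : Int) st else st) st := by
  intro ks
  induction ks with
  | nil => intro st _; rfl
  | cons k kt ih =>
    intro st hst
    rw [List.foldl_cons, List.foldl_cons, pvStackSingle G F st k hst]
    by_cases hc : PySem.List.pyGet? st.1 (k : Int) = some false
    · rw [if_pos hc]
      exact ih _ (le_trans (pvVisitLe G F k st).1 hst)
    · rw [if_neg hc]
      exact ih st hst

theorem pvRangeCast (V : Int) :
    PySem.List.pyRange 0 V 1 = (List.range V.toNat).map (fun (k : Nat) => (k : Int)) := by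
  rw [PySem.List.pyRange_one]
  simp

theorem pvMapConstRange {α : Type} (n : Nat) (b : α) :
    (List.range n).map (fun _ => b) = List.replicate n b := by
  induction n with
  | zero => rfl
  | succ m ih => rw [List.range_succ, List.map_append, ih, List.replicate_succ']; rfl

theorem pvLenCreate (E : List (Int × Int)) (V : Int) :
    (pvCreateGraph E V).length = V.toNat := by
  simp only [pvCreateGraph]
  rw [pvFoldLen E
        (fun NG p => PySem.List.pySetD NG p.1 (PySem.List.pyGetD NG p.1 [] ++ [p.2]))
        (fun acc b => PySem.List.length_pySetD acc b.1 _) _]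
  simp [PySem.List.length_pyRange_one]

theorem pvStateEq (V : Int) (E : List (Int × Int)) :
    ((PySem.List.pyRange 0 V 1).foldl
        (fun st s => pvStack (pvCreateGraph E V) [(s, false)] st.1 st.2)
        (PySem.List.pyRepeat [false] V, ([] : List Int)))
      = ((List.range (pvCreateGraph E V).length).foldl
          (fun st (v : Nat) => if PySem.List.pyGet? st.1 (v : Int) = some false
            then pvDfsVisit (pvCreateGraph E V) ((pvCreateGraph E V).length + 1) (v : Int) st
            else st)
          ((List.range (pvCreateGraph E V).length).map (fun _ => false), ([] : List Int))) := by
  have hn : (pvCreateGraph E V).length = V.toNat := pvLenCreate E V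
  rw [pvRangeCast, List.foldl_map, pvMapConstRange, hn, PySem.List.pyRepeat_singleton]
  exact pvOuterEq (pvCreateGraph E V) (V.toNat + 1) (List.range V.toNat)
    (List.replicate V.toNat false, []) (by simp)

-- ---- dp stage ----

def pvRowFold (G : List (List Int)) (topo : List Int) (r : List Int) : List Int :=
  topo.foldl (fun r v =>
    (PySem.List.pyGetD G v []).foldl (fun r u =>
      PySem.List.pySetD r u (PySem.List.pyGetD r u 0 + PySem.List.pyGetD r v 0)) r) r

theorem pvSetGetDSelf (dp : List (List Int)) (a : Nat) (ha : a < dp.length) (y : List Int) :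
    (dp.set a y).getD a [] = y := by
  simp [List.getD_eq_getElem?_getD, ha]

theorem pvSetGetDNe (dp : List (List Int)) (a b : Nat) (h : a ≠ b) (y : List Int) :
    (dp.set a y).getD b [] = dp.getD b [] := by
  simp [List.getD_eq_getElem?_getD, List.getElem?_set_ne h]

theorem pvSetGetDEq (dp : List (List Int)) (a : Nat) (ha : a < dp.length) :
    dp.set a (dp.getD a []) = dp := by
  have : dp.getD a [] = dp[a] := List.getD_eq_getElem dp [] ha
  rw [this, List.set_getElem_self]

theorem pvCollapse {κ : Type} (g : κ → List Int → List Int) :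
    ∀ (l : List κ) (dp : List (List Int)) (a : Nat), a < dp.length →
      l.foldl (fun dp x => dp.set a (g x (dp.getD a []))) dp
        = dp.set a (l.foldl (fun r x => g x r) (dp.getD a [])) := by
  intro l
  induction l with
  | nil =>
    intro dp a ha
    rw [List.foldl_nil, List.foldl_nil, pvSetGetDEq dp a ha]
  | cons x t ih =>
    intro dp a ha
    rw [List.foldl_cons, List.foldl_cons,
        ih (dp.set a (g x (dp.getD a []))) a (by simpa using ha),
        pvSetGetDSelf dp a ha, List.set_set]

theorem pvRangeUntouched (g : Nat → List Int → List Int) :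
    ∀ (m : Nat) (dp : List (List Int)) (b : Nat), m ≤ b →
      ((List.range m).foldl (fun dp i => dp.set i (g i (dp.getD i []))) dp).getD b []
        = dp.getD b [] := by
  intro m
  induction m with
  | zero => intro dp b _; rfl
  | succ m ih =>
    intro dp b hb
    rw [List.range_succ, List.foldl_append, List.foldl_cons, List.foldl_nil,
        pvSetGetDNe _ m b (by omega), ih dp b (by omega)]

theorem pvFoldRange (g : Nat → List Int → List Int) :
    ∀ (n : Nat) (dp : List (List Int)), n ≤ dp.length → ∀ a, a < n →
      ((List.range n).foldl (fun dp i => dp.set i (g i (dp.getD i []))) dp).getD a []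
        = g a (dp.getD a []) := by
  intro n
  induction n with
  | zero => intro dp _ a ha; omega
  | succ m ih =>
    intro dp hlen a ha
    rw [List.range_succ, List.foldl_append, List.foldl_cons, List.foldl_nil]
    have hXlen : ((List.range m).foldl (fun dp i => dp.set i (g i (dp.getD i []))) dp).length
        = dp.length := pvFoldLen _ _ (fun acc b => by simp) dp
    by_cases hc : a = m
    · subst hc
      rw [pvSetGetDSelf _ a (by omega), pvRangeUntouched g a dp a (le_refl a)]
    · rw [pvSetGetDNe _ m a (fun hh => hc hh.symm)]
      exact ih dp (by omega) a (by omega)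

-- ---- count stage ----

theorem pvCountFold (n : Nat) (dp2 : List (List Int)) (rowB : Int → List Int)
    (hlen : dp2.length = n)
    (hrow : ∀ (i : Int), PySem.Raise.InRange n i → rowB i = dp2.getD (pvIdx n i) []) :
    ∀ (E' : List (Int × Int)), (∀ p ∈ E', PySem.Raise.InRange n p.1) →
      ∀ (t : Int) (rows : PySem.Dict Int (List Int)),
      (∀ k r, rows.get? k = some r → r = rowB k) →
      (E'.foldl (fun (st : Int × PySem.Dict Int (List Int)) p =>
          let rows := if st.2.contains p.1 then st.2 else st.2.insert p.1 (rowB p.1)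
          (if PySem.List.pyGetD (rows.getD p.1 []) p.2 0 = 1 then st.1 + 1 else st.1, rows))
        (t, rows)).1
      = E'.foldl (fun ile p =>
          if PySem.List.pyGetD (PySem.List.pyGetD dp2 p.1 []) p.2 0 = 1 then ile + 1 else ile) t := by
  intro E'
  induction E' with
  | nil => intro _ t rows _; rfl
  | cons p pt ih =>
    intro hE t rows hrows
    rw [List.foldl_cons, List.foldl_cons]
    have hpr : PySem.Raise.InRange n p.1 := hE p (by simp)
    have hA : PySem.List.pyGetD dp2 p.1 [] = dp2.getD (pvIdx n p.1) [] := by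
      have := pvGetD_eq dp2 p.1 [] (by rw [hlen]; exact hpr)
      rwa [hlen] at this
    have hrowsEq :
        (if rows.contains p.1 then rows else rows.insert p.1 (rowB p.1)).getD p.1 []
          = rowB p.1 := by
      by_cases hc : rows.contains p.1 = true
      · rw [if_pos hc]
        rw [PySem.Dict.contains_eq_isSome_get?] at hc
        rcases Option.isSome_iff_exists.mp hc with ⟨r, hr⟩
        rw [PySem.Dict.getD_eq_get?_getD, hr, Option.getD_some]
        exact hrows p.1 r hr
      · rw [if_neg hc, PySem.Dict.getD_eq_get?_getD, PySem.Dict.get?_insert_self,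
            Option.getD_some]
    have hcond :
        (PySem.List.pyGetD ((if rows.contains p.1 then rows
            else rows.insert p.1 (rowB p.1)).getD p.1 []) p.2 0 = 1)
        ↔ (PySem.List.pyGetD (PySem.List.pyGetD dp2 p.1 []) p.2 0 = 1) := by
      rw [hrowsEq, hA, hrow p.1 hpr]
    have hrows' : ∀ k r,
        (if rows.contains p.1 then rows else rows.insert p.1 (rowB p.1)).get? k = some r →
        r = rowB k := by
      intro k r hr
      by_cases hc : rows.contains p.1 = true
      · rw [if_pos hc] at hr; exact hrows k r hr
      · rw [if_neg hc] at hr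
        by_cases hk : k = p.1
        · subst hk
          rw [PySem.Dict.get?_insert_self] at hr
          exact (Option.some_inj.mp hr).symm
        · rw [PySem.Dict.get?_insert_of_ne _ _ hk] at hr
          exact hrows k r hr
    show (List.foldl _ (if _ = 1 then t + 1 else t, _) pt).1 = _
    by_cases hcA : PySem.List.pyGetD (PySem.List.pyGetD dp2 p.1 []) p.2 0 = 1
    · rw [if_pos (hcond.mpr hcA), if_pos hcA]
      exact ih (fun q hq => hE q (by simp [hq])) (t + 1) _ hrows'
    · rw [if_neg (fun hh => hcA (hcond.mp hh)), if_neg hcA]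
      exact ih (fun q hq => hE q (by simp [hq])) t _ hrows'

set_option maxHeartbeats 1600000 in
theorem pvMain (V : Int) (E : List (Int × Int)) (hPre : Pre_critical V E) :
    critical V E = critical_alt V E := by
  simp only [critical, critical_alt]
  have hsucc : pvBuildSucc E V = pvCreateGraph E V := rfl
  rw [hsucc]
  have hord :
      ((PySem.List.pyRange 0 V 1).foldl
        (fun st s => pvStack (pvCreateGraph E V) [(s, false)] st.1 st.2)
        (PySem.List.pyRepeat [false] V, ([] : List Int))).2
      = pvDfs (pvCreateGraph E V) := by
    rw [pvStateEq V E]; rfl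
  rw [hord, pvReverseEq]
  simp only [PySem.List.pySetD_natCast, PySem.List.pyGetD_natCast]
  set G := pvCreateGraph E V with hGdef
  set N := G.length with hNdef
  have hNV : N = V.toNat := pvLenCreate E V
  set topo := (pvDfs G).reverse with htopo
  have hlen0 : ((List.range N).map (fun _ => (List.range N).map (fun _ => (0:Int)))).length = N := by
    simp
  have hlen1 : ((List.range N).foldl (fun dp i => dp.set i ((dp.getD i []).set i 1))
      ((List.range N).map (fun _ => (List.range N).map (fun _ => (0:Int))))).length = N := by
    rw [pvFoldLen (List.range N) (fun dp i => dp.set i ((dp.getD i []).set i 1))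
      (fun acc b => by simp) _]
    exact hlen0
  set dp0 := (List.range N).map (fun _ => (List.range N).map (fun _ => (0:Int))) with hdp0
  set dp1 := (List.range N).foldl (fun dp i => dp.set i ((dp.getD i []).set i 1)) dp0 with hdp1
  set dp2 := (List.range N).foldl (fun dp a =>
      topo.foldl (fun dp v =>
        (PySem.List.pyGetD G v []).foldl (fun dp u =>
          dp.set a (PySem.List.pySetD (dp.getD a []) u
            (PySem.List.pyGetD (dp.getD a []) u 0 + PySem.List.pyGetD (dp.getD a []) v 0))) dp) dp)
    dp1 with hdp2
  have hcol : ∀ (a : Nat), a < N → ∀ (dp : List (List Int)), dp.length = N →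
      topo.foldl (fun dp v =>
        (PySem.List.pyGetD G v []).foldl (fun dp u =>
          dp.set a (PySem.List.pySetD (dp.getD a []) u
            (PySem.List.pyGetD (dp.getD a []) u 0 + PySem.List.pyGetD (dp.getD a []) v 0))) dp) dp
      = dp.set a (pvRowFold G topo (dp.getD a [])) := by
    intro a ha dp hdp
    have step1 := pvFoldlCongrInv (fun dp => dp.length = N) topo
      (fun dp v =>
        (PySem.List.pyGetD G v []).foldl (fun dp u =>
          dp.set a (PySem.List.pySetD (dp.getD a []) u
            (PySem.List.pyGetD (dp.getD a []) u 0 + PySem.List.pyGetD (dp.getD a []) v 0))) dp)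
      (fun dp v => dp.set a ((PySem.List.pyGetD G v []).foldl (fun r u =>
          PySem.List.pySetD r u (PySem.List.pyGetD r u 0 + PySem.List.pyGetD r v 0)) (dp.getD a [])))
      (fun acc v hacc => by
        beta_reduce
        rw [pvFoldLen (PySem.List.pyGetD G v [])
          (fun dp u => dp.set a (PySem.List.pySetD (dp.getD a []) u
            (PySem.List.pyGetD (dp.getD a []) u 0 + PySem.List.pyGetD (dp.getD a []) v 0)))
          (fun acc2 u => by simp) acc]
        exact hacc)
      (fun acc v hacc _ => pvCollapse (fun u r =>
          PySem.List.pySetD r u (PySem.List.pyGetD r u 0 + PySem.List.pyGetD r v 0))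
          (PySem.List.pyGetD G v []) acc a (by rw [hacc]; exact ha)) dp hdp
    rw [step1]
    exact pvCollapse (fun v r => (PySem.List.pyGetD G v []).foldl (fun r u =>
      PySem.List.pySetD r u (PySem.List.pyGetD r u 0 + PySem.List.pyGetD r v 0)) r)
      topo dp a (by rw [hdp]; exact ha)
  have hlen2 : dp2.length = N := by
    rw [hdp2]
    rw [pvFoldLen (List.range N) _
      (fun acc a => pvFoldLen topo _
        (fun acc2 v => pvFoldLen (PySem.List.pyGetD G v []) _ (fun acc3 u => by simp) acc2) acc) dp1]
    exact hlen1
  have hdp0row : ∀ (a : Nat), a < N → dp0.getD a [] = List.replicate N (0:Int) := by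
    intro a ha
    rw [hdp0]
    rw [List.getD_eq_getElem?_getD, List.getElem?_map]
    simp only [List.getElem?_range ha, Option.map_some, Option.getD_some]
    exact pvMapConstRange N 0
  have hdp1row : ∀ (a : Nat), a < N → dp1.getD a [] = (List.replicate N (0:Int)).set a 1 := by
    intro a ha
    have h1 : dp1.getD a [] = (dp0.getD a []).set a 1 :=
      pvFoldRange (fun i r => r.set i 1) N dp0 (le_of_eq hlen0.symm) a ha
    rw [h1, hdp0row a ha]
  have hdp2row : ∀ (a : Nat), a < N →
      dp2.getD a [] = pvRowFold G topo ((List.replicate N (0:Int)).set a 1) := by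
    intro a ha
    have hcongr2 : dp2 = (List.range N).foldl
        (fun dp a => dp.set a (pvRowFold G topo (dp.getD a []))) dp1 := by
      rw [hdp2]
      exact pvFoldlCongrInv (fun dp => dp.length = N) (List.range N)
        (fun dp a =>
          topo.foldl (fun dp v =>
            (PySem.List.pyGetD G v []).foldl (fun dp u =>
              dp.set a (PySem.List.pySetD (dp.getD a []) u
                (PySem.List.pyGetD (dp.getD a []) u 0 + PySem.List.pyGetD (dp.getD a []) v 0))) dp) dp)
        (fun dp a => dp.set a (pvRowFold G topo (dp.getD a [])))
        (fun acc a hacc => by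
          beta_reduce
          rw [pvFoldLen topo _
            (fun acc2 v => pvFoldLen (PySem.List.pyGetD G v []) _ (fun acc3 u => by simp) acc2) acc]
          exact hacc)
        (fun acc a hacc hmem => hcol a (List.mem_range.mp hmem) acc hacc) dp1 hlen1
    have h2 : ((List.range N).foldl
        (fun dp a => dp.set a (pvRowFold G topo (dp.getD a []))) dp1).getD a []
        = pvRowFold G topo (dp1.getD a []) :=
      pvFoldRange (fun _ r => pvRowFold G topo r) N dp1 (le_of_eq hlen1.symm) a ha
    rw [hcongr2, h2, hdp1row a ha]
  have hE : ∀ p ∈ E, PySem.Raise.InRange N p.1 := by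
    intro p hp
    have h := hPre p hp
    constructor <;> omega
  have hrow : ∀ (i : Int), PySem.Raise.InRange N i →
      (fun (a : Int) => List.foldl (fun dp v => List.foldl (fun dp u =>
          PySem.List.pySetD dp u (PySem.List.pyGetD dp u 0 + PySem.List.pyGetD dp v 0)) dp
          (PySem.List.pyGetD G v []))
        (PySem.List.pySetD (PySem.List.pyRepeat [0] V) a 1) topo) i
      = dp2.getD (pvIdx N i) [] := by
    intro i hi
    have hk := pvIdx_lt hi
    have hinit : PySem.List.pySetD (PySem.List.pyRepeat [(0:Int)] V) i 1
        = (List.replicate N (0:Int)).set (pvIdx N i) 1 := by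
      rw [PySem.List.pyRepeat_singleton, ← hNV]
      have h3 := pvSetD_eq (List.replicate N (0:Int)) i 1 (by simpa using hi)
      rw [h3]
      simp
    show pvRowFold G topo (PySem.List.pySetD (PySem.List.pyRepeat [0] V) i 1) = _
    rw [hinit, hdp2row (pvIdx N i) hk]
  have hrows0 : ∀ (k : Int) (r : List Int),
      (PySem.Dict.empty : PySem.Dict Int (List Int)).get? k = some r → r =
      (fun (a : Int) => List.foldl (fun dp v => List.foldl (fun dp u =>
          PySem.List.pySetD dp u (PySem.List.pyGetD dp u 0 + PySem.List.pyGetD dp v 0)) dp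
          (PySem.List.pyGetD G v []))
        (PySem.List.pySetD (PySem.List.pyRepeat [0] V) a 1) topo) k := by
    intro k r h
    rw [PySem.Dict.get?_empty] at h
    exact absurd h (by simp)
  exact (pvCountFold N dp2
    (fun (a : Int) => List.foldl (fun dp v => List.foldl (fun dp u =>
        PySem.List.pySetD dp u (PySem.List.pyGetD dp u 0 + PySem.List.pyGetD dp v 0)) dp
        (PySem.List.pyGetD G v []))
      (PySem.List.pySetD (PySem.List.pyRepeat [0] V) a 1) topo)
    hlen2 hrow E hE 0 PySem.Dict.empty hrows0).symm

-- ===== VERDICT (by name: the statement is the Claim_ definition above) =====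
theorem critical_spec : Claim_equal_critical := by
  intro V E _ hPre
  unfold Spec_critical
  exact pvMain V E hPre
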